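-- pv_equiv track=rewrite | github.com/zoph-io/IAMTrail | automation/lambdas/instant-notifier/index.py | _extract_file_diff
-- ===== SOURCE A (Python) =====
-- def _extract_file_diff(all_lines, policy_name):
--     """Extract only the diff hunk for a specific policy file."""
--     target = f"policies/{policy_name}"
--     result = []
--     in_target = False
--
--     for line in all_lines:
--         if line.startswith("diff --git"):
--             in_target = target in line
--         if in_target:
--             result.append(line)
--
--     return result if result else all_lines
-- ===== SOURCE B (Python) =====
-- def _extract_file_diff(all_lines, policy_name):
--     """Extract only the diff hunk for a specific policy file.
--
--     Build-groups-then-filter decomposition: first materialize the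
--     (header, body) segments, then concatenate the selected ones.
--     """
--     target = f"policies/{policy_name}"
--     segments = []
--     current = None  # (header, body) of the segment being built
--     for line in all_lines:
--         if line.startswith("diff --git"):
--             if current is not None:
--                 segments.append(current)
--             current = (line, [])
--         elif current is not None:
--             current[1].append(line)
--     if current is not None:
--         segments.append(current)
--
--     result = []
--     for header, body in segments:
--         if target in header:
--             result.append(header)
--             result.extend(body)
--     return result if result else all_lines
-- ===== Notes on version B (the rewrite author's own statement) =====
-- stated objective: alternative
-- what changed: Replaces the flag-gated single loop with an explicit build-groups-then-filter decomposition: first materialize (header, body) segments, then concatenate the segments whose header contains the target.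
import Mathlib
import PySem

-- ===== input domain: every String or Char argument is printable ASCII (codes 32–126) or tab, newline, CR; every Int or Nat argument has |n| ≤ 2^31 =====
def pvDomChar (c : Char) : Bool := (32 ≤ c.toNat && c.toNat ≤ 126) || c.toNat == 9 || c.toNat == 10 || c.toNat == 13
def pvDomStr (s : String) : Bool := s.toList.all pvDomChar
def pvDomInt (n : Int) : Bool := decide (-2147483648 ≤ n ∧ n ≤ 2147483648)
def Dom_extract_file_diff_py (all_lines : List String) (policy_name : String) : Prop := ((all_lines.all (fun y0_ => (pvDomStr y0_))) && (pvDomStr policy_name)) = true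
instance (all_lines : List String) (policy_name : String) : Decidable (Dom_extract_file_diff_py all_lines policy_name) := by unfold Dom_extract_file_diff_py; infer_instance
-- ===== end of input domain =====

-- B replaces A's flag-gated single loop by an explicit build-segments-then-filter
-- decomposition (objective: alternative; same return value, same O(n) cost).

-- ===== PORT A =====
-- A's loop body: one state (result, in_target) updated per line.
def pvStepA (target : String) (s : List String × Bool) (line : String) : List String × Bool :=
  let in_target := if PySem.Str.startswith line "diff --git" then PySem.Str.isIn target line else s.2
  (if in_target then s.1 ++ [line] else s.1, in_target)

def extract_file_diff_py (all_lines : List String) (policy_name : String) : List String :=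
  let target := "policies/" ++ policy_name
  let st := all_lines.foldl (pvStepA target) ([], false)
  if st.1.isEmpty then all_lines else st.1

-- ===== PORT B =====
-- B's first loop body: state (finished segments, current (header, body) segment).
def pvSegStep (s : List (String × List String) × Option (String × List String)) (line : String) :
    List (String × List String) × Option (String × List String) :=
  if PySem.Str.startswith line "diff --git" then
    (s.1 ++ s.2.toList, some (line, []))
  else
    match s.2 with
    | some (h, b) => (s.1, some (h, b ++ [line]))
    | none => (s.1, none)

def extract_file_diff_py_alt (all_lines : List String) (policy_name : String) : List String :=
  let target := "policies/" ++ policy_name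
  let st := all_lines.foldl pvSegStep ([], none)
  let segments := st.1 ++ st.2.toList
  let result := segments.foldl
    (fun acc hb => if PySem.Str.isIn target hb.1 then acc ++ hb.1 :: hb.2 else acc) []
  if result.isEmpty then all_lines else result

-- ===== PRECONDITION & SPEC =====
def Spec_extract_file_diff_py (all_lines : List String) (policy_name : String) (out : List String) : Prop := out = extract_file_diff_py_alt all_lines policy_name
instance (all_lines : List String) (policy_name : String) (out : List String) : Decidable (Spec_extract_file_diff_py all_lines policy_name out) := by unfold Spec_extract_file_diff_py; infer_instance

-- ===== CLAIM (what is proved, stated in full; the proofs are below) =====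
def Claim_equal_extract_file_diff_py : Prop := ∀ (all_lines : List String) (policy_name : String), Dom_extract_file_diff_py all_lines policy_name → Spec_extract_file_diff_py all_lines policy_name (extract_file_diff_py all_lines policy_name)

-- ===== LEMMAS AND PROOFS =====

-- not a header line
def pvQ (l : String) : Bool := !PySem.Str.startswith l "diff --git"

-- the segment list both programs implicitly compute, as a structural recursion
def pvSegsR : List String → List (String × List String)
  | [] => []
  | l :: ls =>
    if pvQ l then pvSegsR ls
    else (l, ls.takeWhile pvQ) :: pvSegsR (ls.dropWhile pvQ)
termination_by xs => xs.length
decreasing_by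
  · simp
  · exact Nat.lt_succ_of_le (List.length_dropWhile_le _ _)

-- the selected lines, concatenated
def pvSel (target : String) (segs : List (String × List String)) : List String :=
  (segs.filter (fun hb => PySem.Str.isIn target hb.1)).flatMap (fun hb => hb.1 :: hb.2)

theorem pvSegsR_dropWhile (ls : List String) :
    pvSegsR (ls.dropWhile pvQ) = pvSegsR ls := by
  induction ls with
  | nil => rfl
  | cons l ls ih =>
    by_cases h : pvQ l = true
    · rw [List.dropWhile_cons_of_pos h, ih, pvSegsR]; simp [h]
    · rw [List.dropWhile_cons_of_neg h]

theorem pvSel_cons (target : String) (h : String) (b : List String)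
    (segs : List (String × List String)) :
    pvSel target ((h, b) :: segs) =
      (if PySem.Str.isIn target h then h :: b else []) ++ pvSel target segs := by
  simp only [pvSel, List.filter_cons]
  split_ifs with hs <;> simp

-- A's loop computes the selected lines of the segment decomposition
theorem loopA_eq (target : String) (xs : List String) : ∀ (acc : List String) (b : Bool),
    (xs.foldl (pvStepA target) (acc, b)).1 =
      acc ++ (if b then xs.takeWhile pvQ else []) ++ pvSel target (pvSegsR xs) := by
  induction xs with
  | nil => intro acc b; simp [pvSel, pvSegsR]
  | cons l ls ih =>
    intro acc b
    by_cases hl : pvQ l = true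
    · have hsw : PySem.Str.startswith l "diff --git" = false := by
        simpa [pvQ] using hl
      have hstep : pvStepA target (acc, b) l = (if b then acc ++ [l] else acc, b) := by
        simp only [pvStepA, hsw, Bool.false_eq_true, if_false]
      rw [List.foldl_cons, hstep, ih]
      rw [pvSegsR]; simp only [hl, if_pos, List.takeWhile_cons_of_pos hl]
      cases b <;> simp
    · have hsw : PySem.Str.startswith l "diff --git" = true := by
        simpa [pvQ] using hl
      have hstep : pvStepA target (acc, b) l =
          (if PySem.Str.isIn target l then acc ++ [l] else acc, PySem.Str.isIn target l) := by
        simp only [pvStepA, hsw, if_true]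
      rw [List.foldl_cons, hstep, ih]
      rw [pvSegsR]; simp only [hl, List.takeWhile_cons_of_neg hl,
        Bool.false_eq_true, if_false]
      rw [pvSel_cons, pvSegsR_dropWhile]
      by_cases hc : PySem.Chars.isIn target.toList l.toList = true <;> simp [hc]
  -- (the second component of the state is not needed)

-- B's first loop computes the segment decomposition
theorem loopB_eq (xs : List String) :
    ∀ (segs : List (String × List String)) (cur : Option (String × List String)),
    (let st := xs.foldl pvSegStep (segs, cur); st.1 ++ st.2.toList) =
      segs ++ (match cur with
        | some (h, b) => (h, b ++ xs.takeWhile pvQ) :: pvSegsR (xs.dropWhile pvQ)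
        | none => pvSegsR xs) := by
  induction xs with
  | nil => intro segs cur; cases cur with
    | none => simp [pvSegsR]
    | some hb => simp [pvSegsR]
  | cons l ls ih =>
    intro segs cur
    by_cases hl : pvQ l = true
    · have hsw : PySem.Str.startswith l "diff --git" = false := by
        simpa [pvQ] using hl
      cases cur with
      | none =>
        have hstep : pvSegStep (segs, none) l = (segs, none) := by
          simp only [pvSegStep, hsw, Bool.false_eq_true, if_false]
        rw [List.foldl_cons, hstep, ih]
        rw [pvSegsR]; simp [hl]
      | some hb =>
        obtain ⟨h, b⟩ := hb
        have hstep : pvSegStep (segs, some (h, b)) l = (segs, some (h, b ++ [l])) := by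
          simp only [pvSegStep, hsw, Bool.false_eq_true, if_false]
        rw [List.foldl_cons, hstep, ih]
        rw [List.takeWhile_cons_of_pos hl, List.dropWhile_cons_of_pos hl]
        simp
    · have hsw : PySem.Str.startswith l "diff --git" = true := by
        simpa [pvQ] using hl
      have hstep : pvSegStep (segs, cur) l = (segs ++ cur.toList, some (l, [])) := by
        simp only [pvSegStep, hsw, if_true]
      rw [List.foldl_cons, hstep, ih]
      cases cur with
      | none =>
        rw [pvSegsR]; simp [hl]
      | some hb =>
        obtain ⟨h, b⟩ := hb
        rw [List.takeWhile_cons_of_neg hl, List.dropWhile_cons_of_neg hl, pvSegsR]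
        simp [hl]

-- B's second loop computes pvSel
theorem selLoop_eq (target : String) (segs : List (String × List String)) :
    ∀ (acc : List String),
    segs.foldl (fun acc hb => if PySem.Str.isIn target hb.1 then acc ++ hb.1 :: hb.2 else acc) acc =
      acc ++ pvSel target segs := by
  induction segs with
  | nil => intro acc; simp [pvSel]
  | cons hb segs ih =>
    intro acc
    obtain ⟨h, b⟩ := hb
    rw [List.foldl_cons, ih, pvSel_cons]
    by_cases hc : PySem.Chars.isIn target.toList h.toList = true <;> simp [hc]

-- ===== VERDICT (by name: the statement is the Claim_ definition above) =====
theorem extract_file_diff_py_spec : Claim_equal_extract_file_diff_py := by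
  intro all_lines policy_name _
  unfold Spec_extract_file_diff_py extract_file_diff_py extract_file_diff_py_alt
  have hA := loopA_eq ("policies/" ++ policy_name) all_lines [] false
  have hB := loopB_eq all_lines [] none
  simp only at hA hB
  simp only [hA, hB, selLoop_eq]
  simp
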